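-- pv_equiv track=rewrite | github.com/aeronzh/coding-problems | python/SimilarStrings/SimilarStrings.py | signature
-- ===== SOURCE A (Python) =====
-- def signature(str):
-- 	length = len(str)
-- 	sig = [[False]*(length) for i in range(length)]
-- 	for i in range(0, length):
-- 		sig[i][i] = True
--
-- 	for i in range(0, length):
-- 		for j in range(i+1, length):
-- 			sig[i][j] = (str[i] == str[j])
-- 			sig[j][i] = sig[i][j]
--
-- 	return sig
-- ===== SOURCE B (Python) =====
-- def signature(str):
--     first = {}
--     ids = []
--     for i, c in enumerate(str):
--         if c not in first:
--             first[c] = i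
--         ids.append(first[c])
--     return [[x == y for y in ids] for x in ids]
-- ===== Notes on version B (the rewrite author's own statement) =====
-- stated objective: alternative
-- what changed: Replaces A's triangular mutate-and-mirror double loop over a preallocated n-by-n matrix by a single pass that assigns each position the index of its character's first occurrence via a dict, then builds the matrix directly by comparing those ids.
import Mathlib
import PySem

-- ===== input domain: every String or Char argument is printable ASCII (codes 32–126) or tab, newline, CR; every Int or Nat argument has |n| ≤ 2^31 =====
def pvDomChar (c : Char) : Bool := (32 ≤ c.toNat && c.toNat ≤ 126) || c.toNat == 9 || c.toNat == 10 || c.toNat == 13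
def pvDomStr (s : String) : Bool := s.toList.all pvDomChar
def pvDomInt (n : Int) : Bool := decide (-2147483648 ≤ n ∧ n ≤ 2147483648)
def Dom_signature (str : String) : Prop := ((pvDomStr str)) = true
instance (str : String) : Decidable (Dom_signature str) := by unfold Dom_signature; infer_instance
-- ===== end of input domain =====

-- B replaces A's triangular mutate-and-mirror double loop by a first-occurrence hash index:
-- one pass assigns each position the index of its character's first occurrence, and the matrix
-- is built directly by comparing those ids (same O(n^2) cost, no in-place matrix mutation).

-- ===== PORT A =====
-- sig[i][j] read / write on the list-of-lists matrix; every index A uses is in range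
-- (0 ≤ i,j < length), so List.getD/List.set are exact for Python's indexing and assignment.
def pvGetCell (m : List (List Bool)) (i j : Nat) : Bool := (m.getD i []).getD j false
def pvSetCell (m : List (List Bool)) (i j : Nat) (v : Bool) : List (List Bool) :=
  m.set i ((m.getD i []).set j v)

def signature (str : String) : List (List Bool) :=
  let l := str.toList
  let length := l.length
  -- sig = [[False]*(length) for i in range(length)]
  let sig0 := List.replicate length (List.replicate length false)
  -- for i in range(0, length): sig[i][i] = True    (range(0, length) over Nat: exact, length ≥ 0)
  let sig1 := (List.range length).foldl (fun m i => pvSetCell m i i true) sig0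
  -- for i in range(0, length): for j in range(i+1, length):
  --   sig[i][j] = (str[i] == str[j]); sig[j][i] = sig[i][j]
  -- str[i] with 0 ≤ i < length: exact as l.getD i default
  (List.range length).foldl (fun m i =>
    (List.range' (i + 1) (length - (i + 1))).foldl (fun m j =>
      let m' := pvSetCell m i j (l.getD i default == l.getD j default)
      pvSetCell m' j i (pvGetCell m' i j)) m) sig1

-- ===== PORT B =====
-- one iteration of 'for i, c in enumerate(str)': keep the first-occurrence dict and the ids list;
-- first[c] after the conditional insert is always present, so (get? …).getD 0 is exact.
def pvSigStep (st : PySem.Dict Char Int × List Int) (p : Int × Char) :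
    PySem.Dict Char Int × List Int :=
  let first := if st.1.contains p.2 then st.1 else st.1.insert p.2 p.1
  (first, st.2 ++ [(first.get? p.2).getD 0])

def signature_alt (str : String) : List (List Bool) :=
  let ids := ((PySem.List.enumerate str.toList 0).foldl pvSigStep
    ((PySem.Dict.empty : PySem.Dict Char Int), [])).2
  ids.map (fun x => ids.map (fun y => x == y))

-- ===== PRECONDITION & SPEC =====
def Spec_signature (str : String) (out : List (List Bool)) : Prop := out = signature_alt str
instance (str : String) (out : List (List Bool)) : Decidable (Spec_signature str out) := by unfold Spec_signature; infer_instance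

-- ===== CLAIM (what is proved, stated in full; the proofs are below) =====
def Claim_equal_signature : Prop := ∀ (str : String), Dom_signature str → Spec_signature str (signature str)

-- ===== LEMMAS AND PROOFS =====

-- named copies of the two loop bodies of port A (proof-only; equal to the port's lambdas by rfl)
def pvInStep (l : List Char) (i : Nat) (m : List (List Bool)) (j : Nat) : List (List Bool) :=
  let m' := pvSetCell m i j (l.getD i default == l.getD j default)
  pvSetCell m' j i (pvGetCell m' i j)

def pvOutStep (l : List Char) (n : Nat) (m : List (List Bool)) (i : Nat) : List (List Bool) :=
  (List.range' (i + 1) (n - (i + 1))).foldl (pvInStep l i) m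

-- the common canonical matrix both ports are proved equal to
def pvCn (l : List Char) : List (List Bool) := l.map (fun c => l.map (fun d => c == d))

def pvG (l : List Char) (a b : Nat) : Bool := (l.getD a default == l.getD b default)

def pvShape (n : Nat) (m : List (List Bool)) : Prop := m.length = n ∧ ∀ r ∈ m, r.length = n

theorem pvG_comm (l : List Char) (a b : Nat) : pvG l a b = pvG l b a := by
  unfold pvG; exact BEq.comm

theorem pvShape_setCell {n : Nat} {m : List (List Bool)} (h : pvShape n m) {i : Nat} (hi : i < n) (j : Nat) (v : Bool) :
    pvShape n (pvSetCell m i j v) := by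
  refine ⟨by simp [pvSetCell, h.1], fun r hr => ?_⟩
  rcases List.mem_or_eq_of_mem_set hr with h' | rfl
  · exact h.2 _ h'
  · have hrow : (m.getD i []).length = n := by
      rw [List.getD_eq_getElem _ _ (h.1 ▸ hi)]; exact h.2 _ (List.getElem_mem _)
    simpa using hrow
theorem pvGetCell_setCell {n : Nat} {m : List (List Bool)} (h : pvShape n m) {i j : Nat}
    (hi : i < n) (hj : j < n) (v : Bool) (a b : Nat) :
    pvGetCell (pvSetCell m i j v) a b = if a = i ∧ b = j then v else pvGetCell m a b := by
  have hi' : i < m.length := h.1 ▸ hi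
  have hrowlen : (m.getD i []).length = n := by
    rw [List.getD_eq_getElem _ _ hi']; exact h.2 _ (List.getElem_mem _)
  unfold pvGetCell pvSetCell
  by_cases ha : a = i
  · subst ha
    simp only [List.getD_eq_getElem?_getD]
    rw [List.getElem?_set_self hi']
    simp only [Option.getD_some]
    by_cases hb : b = j
    · subst hb
      rw [List.getElem?_set_self (hrowlen ▸ hj)]
      simp
    · rw [List.getElem?_set_ne (fun h => hb h.symm)]
      simp [hb]
  · simp only [List.getD_eq_getElem?_getD]
    rw [List.getElem?_set_ne (fun h => ha h.symm)]
    simp [ha]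

theorem pvDiag {n : Nat} (L : List Nat) {m : List (List Bool)} (hL : ∀ x ∈ L, x < n)
    (hm : pvShape n m) :
    pvShape n (L.foldl (fun m i => pvSetCell m i i true) m) ∧
    ∀ a b, pvGetCell (L.foldl (fun m i => pvSetCell m i i true) m) a b
      = if a = b ∧ a ∈ L then true else pvGetCell m a b := by
  induction L generalizing m with
  | nil => exact ⟨hm, fun a b => by simp⟩
  | cons i t ih =>
    have hi : i < n := hL i (by simp)
    have hm' : pvShape n (pvSetCell m i i true) := pvShape_setCell hm hi i true
    obtain ⟨hsh, hcell⟩ := ih (fun x hx => hL x (by simp [hx])) hm'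
    refine ⟨hsh, fun a b => ?_⟩
    rw [List.foldl_cons, hcell a b, pvGetCell_setCell hm hi hi]
    by_cases hab : a = b
    · subst hab
      by_cases hat : a ∈ t
      · simp [hat]
      · by_cases hai : a = i
        · subst hai; simp [hat]
        · simp [hat, hai]
    · have h2 : ¬(a = i ∧ b = i) := fun h => hab (h.1.trans h.2.symm)
      simp [hab, h2]

theorem pvInner {n : Nat} (l : List Char) (i : Nat) (J : List Nat) {m : List (List Bool)}
    (hi : i < n) (hJ : ∀ x ∈ J, i < x ∧ x < n) (hm : pvShape n m) :
    pvShape n (J.foldl (pvInStep l i) m) ∧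
    ∀ a b, pvGetCell (J.foldl (pvInStep l i) m) a b
      = if (a = i ∧ b ∈ J) ∨ (b = i ∧ a ∈ J) then pvG l a b else pvGetCell m a b := by
  induction J generalizing m with
  | nil => exact ⟨hm, fun a b => by simp⟩
  | cons j t ih =>
    obtain ⟨hij, hjn⟩ := hJ j (by simp)
    have hne : i ≠ j := Nat.ne_of_lt hij
    have hb1 : pvShape n (pvSetCell m i j (pvG l i j)) := pvShape_setCell hm hi j _
    have hstep : pvInStep l i m j
        = pvSetCell (pvSetCell m i j (pvG l i j)) j i (pvG l i j) := by
      show pvSetCell (pvSetCell m i j (pvG l i j)) j i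
          (pvGetCell (pvSetCell m i j (pvG l i j)) i j) = _
      rw [pvGetCell_setCell hm hi hjn]
      simp
    have hb2 : pvShape n (pvInStep l i m j) := by
      rw [hstep]; exact pvShape_setCell hb1 hjn i _
    obtain ⟨hsh, hcell⟩ := ih (fun x hx => hJ x (by simp [hx])) hb2
    refine ⟨hsh, fun a b => ?_⟩
    rw [List.foldl_cons, hcell a b]
    by_cases hT : (a = i ∧ b ∈ t) ∨ (b = i ∧ a ∈ t)
    · have hT' : (a = i ∧ b ∈ j :: t) ∨ (b = i ∧ a ∈ j :: t) := by
        rcases hT with ⟨h1, h2⟩ | ⟨h1, h2⟩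
        · exact Or.inl ⟨h1, by simp [h2]⟩
        · exact Or.inr ⟨h1, by simp [h2]⟩
      rw [if_pos hT, if_pos hT']
    · rw [if_neg hT, hstep, pvGetCell_setCell hb1 hjn hi, pvGetCell_setCell hm hi hjn]
      by_cases h1 : a = i ∧ b = j
      · obtain ⟨rfl, rfl⟩ := h1
        rw [if_neg (fun h => hne h.1), if_pos ⟨rfl, rfl⟩,
          if_pos (Or.inl ⟨rfl, by simp⟩)]
      · by_cases h2 : a = j ∧ b = i
        · obtain ⟨rfl, rfl⟩ := h2
          rw [if_pos ⟨rfl, rfl⟩, if_pos (Or.inr ⟨rfl, by simp⟩)]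
          exact pvG_comm l b a
        · have hC : ¬((a = i ∧ b ∈ j :: t) ∨ (b = i ∧ a ∈ j :: t)) := by
            rintro (⟨rfl, hbm⟩ | ⟨rfl, ham⟩)
            · rcases List.mem_cons.mp hbm with rfl | hbt
              · exact h1 ⟨rfl, rfl⟩
              · exact hT (Or.inl ⟨rfl, hbt⟩)
            · rcases List.mem_cons.mp ham with rfl | hat
              · exact h2 ⟨rfl, rfl⟩
              · exact hT (Or.inr ⟨rfl, hat⟩)
          rw [if_neg hC, if_neg (fun h => h2 ⟨h.1, h.2⟩), if_neg (fun h => h1 ⟨h.1, h.2⟩)]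

theorem pvOuter {n : Nat} (l : List Char) (I : List Nat) {m : List (List Bool)}
    (hI : ∀ x ∈ I, x < n) (hm : pvShape n m) :
    pvShape n (I.foldl (pvOutStep l n) m) ∧
    ∀ a b, pvGetCell (I.foldl (pvOutStep l n) m) a b
      = if (a ∈ I ∧ a < b ∧ b < n) ∨ (b ∈ I ∧ b < a ∧ a < n) then pvG l a b
        else pvGetCell m a b := by
  induction I generalizing m with
  | nil => exact ⟨hm, fun a b => by simp⟩
  | cons i t ih =>
    have hin : i < n := hI i (by simp)
    have hJ : ∀ x ∈ List.range' (i + 1) (n - (i + 1)), i < x ∧ x < n := by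
      intro x hx
      rw [List.mem_range'_1] at hx
      omega
    obtain ⟨hsh1, hcell1⟩ := pvInner (n := n) l i (List.range' (i + 1) (n - (i + 1))) hin hJ hm
    have hsh1' : pvShape n (pvOutStep l n m i) := hsh1
    obtain ⟨hsh, hcell⟩ := ih (fun x hx => hI x (by simp [hx])) hsh1'
    refine ⟨hsh, fun a b => ?_⟩
    have hmem : ∀ x, x ∈ List.range' (i + 1) (n - (i + 1)) ↔ (i < x ∧ x < n) := by
      intro x; rw [List.mem_range'_1]; omega
    rw [List.foldl_cons, hcell a b]
    by_cases hT : (a ∈ t ∧ a < b ∧ b < n) ∨ (b ∈ t ∧ b < a ∧ a < n)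
    · have hT' : (a ∈ i :: t ∧ a < b ∧ b < n) ∨ (b ∈ i :: t ∧ b < a ∧ a < n) := by
        rcases hT with ⟨h1, h2⟩ | ⟨h1, h2⟩
        · exact Or.inl ⟨by simp [h1], h2⟩
        · exact Or.inr ⟨by simp [h1], h2⟩
      rw [if_pos hT, if_pos hT']
    · rw [if_neg hT,
        show pvOutStep l n m i = (List.range' (i + 1) (n - (i + 1))).foldl (pvInStep l i) m
          from rfl, hcell1 a b]
      by_cases h1 : a = i ∧ i < b ∧ b < n
      · rw [if_pos (Or.inl ⟨h1.1, (hmem b).mpr (h1.1 ▸ h1.2)⟩),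
          if_pos (Or.inl ⟨by simp [h1.1], h1.1 ▸ h1.2⟩)]
      · by_cases h2 : b = i ∧ i < a ∧ a < n
        · rw [if_pos (Or.inr ⟨h2.1, (hmem a).mpr (h2.1 ▸ h2.2)⟩),
            if_pos (Or.inr ⟨by simp [h2.1], h2.1 ▸ h2.2⟩)]
        · have hC1 : ¬((a = i ∧ b ∈ List.range' (i + 1) (n - (i + 1))) ∨
              (b = i ∧ a ∈ List.range' (i + 1) (n - (i + 1)))) := by
            rintro (⟨rfl, hb⟩ | ⟨rfl, ha⟩)
            · exact h1 ⟨rfl, (hmem b).mp hb⟩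
            · exact h2 ⟨rfl, (hmem a).mp ha⟩
          have hC2 : ¬((a ∈ i :: t ∧ a < b ∧ b < n) ∨ (b ∈ i :: t ∧ b < a ∧ a < n)) := by
            rintro (⟨ham, hab⟩ | ⟨hbm, hba⟩)
            · rcases List.mem_cons.mp ham with rfl | hat
              · exact h1 ⟨rfl, hab⟩
              · exact hT (Or.inl ⟨hat, hab⟩)
            · rcases List.mem_cons.mp hbm with rfl | hbt
              · exact h2 ⟨rfl, hba⟩
              · exact hT (Or.inr ⟨hbt, hba⟩)
          rw [if_neg hC1, if_neg hC2]

theorem pvMatrix_ext {n : Nat} {m1 m2 : List (List Bool)} (h1 : pvShape n m1) (h2 : pvShape n m2)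
    (h : ∀ a b, a < n → b < n → pvGetCell m1 a b = pvGetCell m2 a b) : m1 = m2 := by
  apply List.ext_getElem (h1.1.trans h2.1.symm)
  intro a ha1 ha2
  apply List.ext_getElem
  · rw [h1.2 _ (List.getElem_mem _), h2.2 _ (List.getElem_mem _)]
  intro b hb1 hb2
  have ha : a < n := h1.1 ▸ ha1
  have hb : b < n := by rw [h1.2 _ (List.getElem_mem _)] at hb1; exact hb1
  have hcell := h a b ha hb
  unfold pvGetCell at hcell
  rw [List.getD_eq_getElem _ _ ha1, List.getD_eq_getElem _ _ ha2] at hcell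
  rw [List.getD_eq_getElem _ _ hb1, List.getD_eq_getElem _ _ hb2] at hcell
  exact hcell

theorem pvCn_shape (l : List Char) : pvShape l.length (pvCn l) := by
  refine ⟨by simp [pvCn], fun r hr => ?_⟩
  simp only [pvCn, List.mem_map] at hr
  obtain ⟨c, _, rfl⟩ := hr
  simp

theorem pvCn_cell (l : List Char) (a b : Nat) (ha : a < l.length) (hb : b < l.length) :
    pvGetCell (pvCn l) a b = pvG l a b := by
  have ha' : a < (pvCn l).length := by simpa [pvCn] using ha
  unfold pvGetCell
  rw [List.getD_eq_getElem _ _ ha',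
    show (pvCn l)[a]'ha' = l.map (fun d => (l[a]'ha) == d) by simp [pvCn],
    List.getD_eq_getElem _ _ (by simpa using hb), List.getElem_map]
  unfold pvG
  rw [List.getD_eq_getElem _ _ ha, List.getD_eq_getElem _ _ hb]

theorem pvA_eq_cn (s : String) : signature s = pvCn s.toList := by
  have hA : signature s = (List.range s.toList.length).foldl (pvOutStep s.toList s.toList.length)
      ((List.range s.toList.length).foldl (fun m i => pvSetCell m i i true)
        (List.replicate s.toList.length (List.replicate s.toList.length false))) := rfl
  have hshape0 : pvShape s.toList.length
      (List.replicate s.toList.length (List.replicate s.toList.length false)) := by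
    refine ⟨by simp, fun r hr => ?_⟩
    rw [List.eq_of_mem_replicate hr]; simp
  obtain ⟨hdsh, hdcell⟩ := pvDiag (List.range s.toList.length) (by simp) hshape0
  obtain ⟨hosh, hocell⟩ := pvOuter s.toList (List.range s.toList.length) (by simp) hdsh
  rw [hA]
  apply pvMatrix_ext hosh (pvCn_shape s.toList)
  intro a b ha hb
  rw [hocell a b, hdcell a b, pvCn_cell s.toList a b ha hb]
  rcases Nat.lt_trichotomy a b with h | h | h
  · rw [if_pos (Or.inl ⟨by simpa using ha, h, hb⟩)]
  · subst h
    rw [if_neg (by rintro (⟨-, h1, -⟩ | ⟨-, h1, -⟩) <;> omega),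
      if_pos ⟨rfl, by simpa using ha⟩]
    unfold pvG; simp
  · rw [if_pos (Or.inr ⟨by simpa using hb, h, ha⟩)]

theorem pvIdxOf_append_self (xs : List Char) (x : Char) (h : x ∉ xs) :
    (xs ++ [x]).idxOf x = xs.length := by
  induction xs with
  | nil => simp
  | cons a t ih =>
    have hax : (a == x) = false := by
      simp only [beq_eq_false_iff_ne, ne_eq]
      intro hh; exact h (by simp [hh])
    simp [List.idxOf_cons, hax, ih (fun hm => h (by simp [hm]))]

theorem pvBLoop (xs : List Char) :
    (∀ c, ((PySem.List.enumerate xs 0).foldl pvSigStep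
        ((PySem.Dict.empty : PySem.Dict Char Int), [])).1.get? c
      = if c ∈ xs then some (xs.idxOf c : Int) else none) ∧
    ((PySem.List.enumerate xs 0).foldl pvSigStep
        ((PySem.Dict.empty : PySem.Dict Char Int), [])).2
      = xs.map (fun c => (xs.idxOf c : Int)) := by
  induction xs using List.reverseRecOn with
  | nil =>
    constructor
    · intro c
      simp [PySem.List.enumerate_nil, PySem.Dict.get?_empty]
    · simp [PySem.List.enumerate_nil]
  | append_singleton t x ih =>
    obtain ⟨ihd, ihids⟩ := ih
    rw [PySem.List.enumerate_append, PySem.List.enumerate_cons, PySem.List.enumerate_nil,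
      List.foldl_append, List.foldl_cons, List.foldl_nil]
    simp only [pvSigStep]
    by_cases hx : x ∈ t
    · have hget : (((PySem.List.enumerate t 0).foldl pvSigStep
          ((PySem.Dict.empty : PySem.Dict Char Int), [])).1.get? x
          = some (t.idxOf x : Int)) := by rw [ihd x, if_pos hx]
      have hcont : (((PySem.List.enumerate t 0).foldl pvSigStep
          ((PySem.Dict.empty : PySem.Dict Char Int), [])).1.contains x) = true := by
        rw [PySem.Dict.contains_eq_isSome_get?, hget]; rfl
      rw [hcont]
      simp only [if_true]
      constructor
      · intro c
        rw [ihd c]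
        by_cases hc : c ∈ t
        · rw [if_pos hc, if_pos (by simp [hc]), List.idxOf_append_of_mem hc]
        · have hcx : ¬ c ∈ t ++ [x] := by
            simp only [List.mem_append, List.mem_singleton]
            rintro (h | rfl)
            · exact hc h
            · exact hc hx
          rw [if_neg hc, if_neg hcx]
      · rw [ihids, hget, List.map_append]
        simp only [Option.getD_some]
        congr 1
        · apply List.map_congr_left
          intro c hc
          rw [List.idxOf_append_of_mem hc]
        · simp [List.idxOf_append_of_mem hx]
    · have hget : (((PySem.List.enumerate t 0).foldl pvSigStep
          ((PySem.Dict.empty : PySem.Dict Char Int), [])).1.get? x = none) := by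
        rw [ihd x, if_neg hx]
      have hcont : (((PySem.List.enumerate t 0).foldl pvSigStep
          ((PySem.Dict.empty : PySem.Dict Char Int), [])).1.contains x) = false := by
        rw [PySem.Dict.contains_eq_isSome_get?, hget]; rfl
      rw [hcont]
      simp only [Bool.false_eq_true, if_false]
      constructor
      · intro c
        rw [PySem.Dict.get?_insert]
        by_cases hcx : c = x
        · subst hcx
          rw [if_pos rfl, if_pos (by simp), pvIdxOf_append_self t c hx]
          simp
        · rw [if_neg hcx, ihd c]
          by_cases hc : c ∈ t
          · rw [if_pos hc, if_pos (by simp [hc]), List.idxOf_append_of_mem hc]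
          · have hcm : ¬ c ∈ t ++ [x] := by
              simp only [List.mem_append, List.mem_singleton]
              rintro (h | rfl)
              · exact hc h
              · exact hcx rfl
            rw [if_neg hc, if_neg hcm]
      · rw [ihids, PySem.Dict.get?_insert_self, List.map_append]
        simp only [Option.getD_some]
        congr 1
        · apply List.map_congr_left
          intro c hc
          rw [List.idxOf_append_of_mem hc]
        · simp [pvIdxOf_append_self t x hx]

theorem pvIds_iff (xs : List Char) (c d : Char) (hc : c ∈ xs) (hd : d ∈ xs) :
    ((xs.idxOf c : Int) == (xs.idxOf d : Int)) = (c == d) := by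
  have h1 : xs.idxOf c = xs.idxOf d ↔ c = d := by
    constructor
    · intro h
      have hc' := List.getElem_idxOf (x := c) (xs := xs) (List.idxOf_lt_length_of_mem hc)
      have hd' := List.getElem_idxOf (x := d) (xs := xs) (List.idxOf_lt_length_of_mem hd)
      rw [← hc', ← hd']
      simp [h]
    · intro h; rw [h]
  rw [Bool.eq_iff_iff]
  simp [h1]

theorem pvB_eq_cn (s : String) : signature_alt s = pvCn s.toList := by
  obtain ⟨-, hids⟩ := pvBLoop s.toList
  show (((PySem.List.enumerate s.toList 0).foldl pvSigStep
      ((PySem.Dict.empty : PySem.Dict Char Int), [])).2.map (fun x =>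
    ((PySem.List.enumerate s.toList 0).foldl pvSigStep
      ((PySem.Dict.empty : PySem.Dict Char Int), [])).2.map (fun y => x == y))) = pvCn s.toList
  rw [hids, List.map_map]
  apply List.map_congr_left
  intro c hc
  simp only [Function.comp_apply, List.map_map]
  apply List.map_congr_left
  intro d hd
  simp only [Function.comp_apply]
  exact pvIds_iff s.toList c d hc hd

-- ===== VERDICT (by name: the statement is the Claim_ definition above) =====
theorem signature_spec : Claim_equal_signature := by
  intro s _
  unfold Spec_signature
  rw [pvA_eq_cn, pvB_eq_cn]
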